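-- pv_equiv track=rewrite | github.com/leejiho1996/forCodingTest | 백준/Gold/7490. 0 만들기/0 만들기.py | parse
-- ===== SOURCE A (Python) =====
-- def parse(expr):
--     expr = expr.replace(" ", "")
--     numbers = []
--     op = []
--
--     num = ""
--     for i in range(len(expr)):
--         if expr[i] == "+" or expr[i] == "-":
--             op.append(expr[i])
--             numbers.append(int(num))
--             num = ""
--         else:
--             num += expr[i]
--
--     if len(num) > 0:
--         numbers.append(int(num))
--
--     cur = 1
--     total = numbers[0]
--
--     for i in op:
--         if i == "+":
--             total += numbers[cur]
--         else:
--             total -= numbers[cur]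
--         cur += 1
--
--     return total
-- ===== SOURCE B (Python) =====
-- def parse(expr):
--     total = 0
--     sign = 1
--     num = ""
--     for ch in expr.replace(" ", "") + "+":
--         if ch == "+" or ch == "-":
--             total += sign * int(num)
--             sign = 1 if ch == "+" else -1
--             num = ""
--         else:
--             num += ch
--     return total
-- ===== Notes on version B (the rewrite author's own statement) =====
-- stated objective: simpler
-- what changed: A tokenizes into a numbers list and an operator list and then runs a second index-driven loop; B is a single pass keeping only a running total, a pending sign and the current digit buffer, flushed by a sentinel plus-operator appended to the input.
import Mathlib
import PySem

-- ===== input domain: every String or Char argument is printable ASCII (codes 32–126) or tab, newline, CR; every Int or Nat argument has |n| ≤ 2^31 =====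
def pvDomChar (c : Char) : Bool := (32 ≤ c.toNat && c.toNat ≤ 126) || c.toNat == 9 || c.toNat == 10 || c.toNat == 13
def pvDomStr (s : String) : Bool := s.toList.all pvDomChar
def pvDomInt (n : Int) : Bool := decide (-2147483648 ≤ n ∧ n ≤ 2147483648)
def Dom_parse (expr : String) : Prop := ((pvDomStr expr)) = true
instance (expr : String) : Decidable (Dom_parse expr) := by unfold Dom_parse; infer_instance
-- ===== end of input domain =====

-- B replaces A's two-phase design (build a numbers list and an operator list, then a second
-- index-driven loop) by a single pass keeping a running total, a pending sign and a digit
-- buffer, flushed by a trailing sentinel operator; same values, simpler state.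

-- ===== PORT A =====
-- step of A's first loop: state (numbers, op, num)
def parseStepA (st : List Int × List Char × List Char) (c : Char) :
    List Int × List Char × List Char :=
  let (numbers, op, num) := st
  if c = '+' ∨ c = '-' then
    (numbers ++ [(PySem.Int.ofChars? num).getD 0], op ++ [c], [])
  else
    (numbers, op, num ++ [c])

-- step of A's second loop: state (total, cur), reading numbers[cur]
def parseStepA2 (numbers : List Int) (st : Int × Int) (c : Char) : Int × Int :=
  let (total, cur) := st
  (if c = '+' then total + (PySem.List.pyGet? numbers cur).getD 0
   else total - (PySem.List.pyGet? numbers cur).getD 0, cur + 1)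

def parse (expr : String) : Int :=
  let s := PySem.Chars.replace expr.toList [' '] []
  let (numbers, op, num) := s.foldl parseStepA ([], [], [])
  let numbers := if num.length > 0 then numbers ++ [(PySem.Int.ofChars? num).getD 0] else numbers
  let total0 : Int := (PySem.List.pyGet? numbers 0).getD 0
  (op.foldl (parseStepA2 numbers) (total0, 1)).1

-- ===== PORT B =====
-- step of B's single loop: state (total, sign, num)
def parseStepB (st : Int × Int × List Char) (c : Char) : Int × Int × List Char :=
  let (total, sign, num) := st
  if c = '+' ∨ c = '-' then
    (total + sign * (PySem.Int.ofChars? num).getD 0, if c = '+' then 1 else -1, [])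
  else
    (total, sign, num ++ [c])

def parse_alt (expr : String) : Int :=
  let s := PySem.Chars.replace expr.toList [' '] []
  ((s ++ ['+']).foldl parseStepB (0, 1, [])).1

-- ===== PRECONDITION & SPEC =====
-- tokens of the space-stripped string between '+'/'-' operators (the trailing token included)
def parseTokens : List Char → List (List Char)
  | [] => [[]]
  | c :: cs =>
    if c = '+' ∨ c = '-' then [] :: parseTokens cs
    else
      match parseTokens cs with
      | t :: ts => (c :: t) :: ts
      | [] => [[c]]

-- t is accepted by Python's int(): optional surrounding whitespace, then ASCII digits with
-- single underscores strictly between digits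
def parseValidInt (t : List Char) : Bool :=
  let u := ((t.dropWhile PySem.Int.isIntSpace).reverse.dropWhile PySem.Int.isIntSpace).reverse
  (!u.isEmpty) &&
  u.all (fun c => c.isDigit || c = '_') &&
  (u.head?.getD '_').isDigit && (u.getLast?.getD '_').isDigit &&
  !(PySem.Chars.isIn ['_', '_'] u)

-- Pre_ holds exactly when A returns: every token of the space-stripped input is a valid int
-- literal (an empty/invalid token is where A raises ValueError or IndexError)
def Pre_parse (expr : String) : Prop :=
  ∀ t ∈ parseTokens (PySem.Chars.replace expr.toList [' '] []), parseValidInt t = true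

instance (expr : String) : Decidable (Pre_parse expr) := by unfold Pre_parse; infer_instance

def pvWitness_parse : String := "1+2 - 3"

def Spec_parse (expr : String) (out : Int) : Prop := out = parse_alt expr
instance (expr : String) (out : Int) : Decidable (Spec_parse expr out) := by unfold Spec_parse; infer_instance

-- ===== CLAIM (what is proved, stated in full; the proofs are below) =====
def Claim_equal_parse : Prop := ∀ (expr : String), Dom_parse expr → Pre_parse expr → Spec_parse expr (parse expr)

-- ===== LEMMAS AND PROOFS =====

-- value of int(num) as both ports read it
def pvVal (t : List Char) : Int := (PySem.Int.ofChars? t).getD 0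

-- reference tokenization of A's first loop, from buffer b
def pvNums (cs : List Char) (b : List Char) : List Int :=
  match cs with
  | [] => if b.length > 0 then [pvVal b] else []
  | c :: cs => if c = '+' ∨ c = '-' then pvVal b :: pvNums cs [] else pvNums cs (b ++ [c])

def pvOps (cs : List Char) : List Char :=
  match cs with
  | [] => []
  | c :: cs => if c = '+' ∨ c = '-' then c :: pvOps cs else pvOps cs

-- signed sum computed by A's second loop over the operator list
def pvSgnSum : List Char → List Int → Int
  | [], _ => 0
  | o :: os, vs =>
      (if o = '+' then vs.head?.getD 0 else -(vs.head?.getD 0)) + pvSgnSum os vs.tail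

-- A's first loop computes pvNums/pvOps
theorem foldA_char (cs : List Char) : ∀ ns os b,
    (if (cs.foldl parseStepA (ns, os, b)).2.2.length > 0 then
        (cs.foldl parseStepA (ns, os, b)).1 ++ [pvVal (cs.foldl parseStepA (ns, os, b)).2.2]
      else (cs.foldl parseStepA (ns, os, b)).1) = ns ++ pvNums cs b ∧
    (cs.foldl parseStepA (ns, os, b)).2.1 = os ++ pvOps cs := by
  induction cs with
  | nil =>
      intro ns os b
      simp only [List.foldl_nil, pvNums, pvOps]
      constructor
      · split <;> simp
      · simp
  | cons c cs ih =>
      intro ns os b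
      simp only [List.foldl_cons, parseStepA, pvNums, pvOps]
      by_cases hc : c = '+' ∨ c = '-'
      · simp only [hc, if_true]
        obtain ⟨h1, h2⟩ := ih (ns ++ [(PySem.Int.ofChars? b).getD 0]) (os ++ [c]) []
        refine ⟨?_, ?_⟩
        · rw [h1]; simp [pvVal]
        · rw [h2]; simp
      · simp only [hc, if_false]
        obtain ⟨h1, h2⟩ := ih ns os (b ++ [c])
        exact ⟨h1, h2⟩

-- A's second loop from (t, k) adds the signed sum of numbers.drop k
theorem foldA2_char (ns : List Int) (os : List Char) : ∀ (t : Int) (k : Nat),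
    (os.foldl (parseStepA2 ns) (t, (k : Int))).1 = t + pvSgnSum os (ns.drop k) := by
  induction os with
  | nil => intro t k; simp [pvSgnSum]
  | cons o os ih =>
      intro t k
      simp only [List.foldl_cons, parseStepA2, pvSgnSum]
      have hk : (k : Int) + 1 = ((k + 1 : Nat) : Int) := by omega
      have hget : (PySem.List.pyGet? ns (k : Int)).getD 0 = (ns.drop k).head?.getD 0 := by
        rw [PySem.List.pyGet?_natCast, ← List.head?_drop]
      have hdrop : (ns.drop k).tail = ns.drop (k + 1) := List.tail_drop
      rw [hk]
      by_cases ho : o = '+'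
      · simp only [ho, if_true]
        rw [ih, hget, hdrop]; ring
      · simp only [ho, if_false]
        rw [ih, hget, hdrop]; ring

-- B's loop from (t, s, b): the total it adds
def pvG (cs : List Char) (s : Int) (b : List Char) : Int :=
  match cs with
  | [] => 0
  | c :: cs =>
      if c = '+' ∨ c = '-' then s * pvVal b + pvG cs (if c = '+' then 1 else -1) []
      else pvG cs s (b ++ [c])

theorem foldB_char (cs : List Char) : ∀ (t s : Int) (b : List Char),
    (cs.foldl parseStepB (t, s, b)).1 = t + pvG cs s b := by
  induction cs with
  | nil => intro t s b; simp [pvG]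
  | cons c cs ih =>
      intro t s b
      simp only [List.foldl_cons, parseStepB, pvG]
      by_cases hc : c = '+' ∨ c = '-'
      · simp only [hc, if_true]; rw [ih]; simp only [pvVal]; ring
      · simp only [hc, if_false]; rw [ih]

theorem pvVal_nil : pvVal [] = 0 := by decide

-- the key lemma: B's single pass equals A's tokenize-then-evaluate
theorem pvG_eq (cs : List Char) : ∀ (s : Int) (b : List Char),
    pvG (cs ++ ['+']) s b =
      s * (pvNums cs b).head?.getD 0 + pvSgnSum (pvOps cs) (pvNums cs b).tail := by
  induction cs with
  | nil =>
      intro s b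
      simp only [List.nil_append, pvG, pvOps, pvNums, pvSgnSum]
      by_cases hb : b.length > 0
      · simp [hb]
      · have hbnil : b = [] := by
          cases b with
          | nil => rfl
          | cons x xs => simp at hb
        simp [hbnil, pvVal_nil]
  | cons c cs ih =>
      intro s b
      simp only [List.cons_append, pvG, pvOps, pvNums]
      by_cases hc : c = '+' ∨ c = '-'
      · simp only [hc, if_true]
        rw [ih]
        simp only [pvSgnSum, List.head?_cons, Option.getD_some, List.tail_cons]
        by_cases hp : c = '+'
        · simp only [hp, if_true]; ring
        · simp only [hp, if_false]; ring
      · simp only [hc, if_false]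
        exact ih s (b ++ [c])

-- both ports on the same space-stripped char list
theorem core_eq (s : List Char) :
    (let (numbers, op, num) := s.foldl parseStepA ([], [], [])
     let numbers := if num.length > 0 then numbers ++ [(PySem.Int.ofChars? num).getD 0] else numbers
     (op.foldl (parseStepA2 numbers) ((PySem.List.pyGet? numbers 0).getD 0, 1)).1) =
    ((s ++ ['+']).foldl parseStepB (0, 1, [])).1 := by
  obtain ⟨h1, h2⟩ := foldA_char s [] [] []
  rcases hfold : s.foldl parseStepA ([], [], []) with ⟨ns, os, b⟩
  rw [hfold] at h1 h2
  simp only [List.nil_append] at h1 h2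
  simp only []
  rw [foldB_char, pvG_eq]
  have hv : (PySem.Int.ofChars? b).getD 0 = pvVal b := rfl
  rw [hv, h1, h2]
  have h2' := foldA2_char (pvNums s []) (pvOps s) ((PySem.List.pyGet? (pvNums s []) 0).getD 0) 1
  norm_num at h2'
  rw [h2']
  have h0 : (PySem.List.pyGet? (pvNums s []) 0).getD 0 = (pvNums s []).head?.getD 0 := by
    rw [PySem.List.pyGet?_zero]
    cases pvNums s [] <;> simp
  rw [h0]
  ring

-- ===== VERDICT (by name: the statement is the Claim_ definition above) =====
theorem parse_spec : Claim_equal_parse := by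
  intro expr _ _
  show parse expr = parse_alt expr
  exact core_eq (PySem.Chars.replace expr.toList [' '] [])
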